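-- pv_equiv track=rewrite | github.com/HydrologicEngineeringCenter/SHEF_processing | shefParser.py | remove_comment_fields
-- ===== SOURCE A (Python) =====
-- def remove_comment_fields(line) :
--     '''
--     Remove colon-delimited comments from a message line
--     '''
--     in_comment_field = False
--     chars = []
--     for c in line :
--         if c == ':' :
--             in_comment_field = not in_comment_field
--         elif not in_comment_field :
--             chars.append(c)
--     message_line = "".join(chars)
--     return message_line
-- ===== SOURCE B (Python) =====
-- def remove_comment_fields(line):
--     '''
--     Remove colon-delimited comments from a message line
--     '''
--     parts = line.split(':')
--     return ''.join(part for i, part in enumerate(parts) if i % 2 == 0)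
-- ===== Notes on version B (the rewrite author's own statement) =====
-- stated objective: idiomatic
-- what changed: Replaced the character-by-character loop with a toggling in-comment flag by splitting the line on ':' and joining the even-indexed segments (the text between colon pairs alternates kept/commented).
import Mathlib
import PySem

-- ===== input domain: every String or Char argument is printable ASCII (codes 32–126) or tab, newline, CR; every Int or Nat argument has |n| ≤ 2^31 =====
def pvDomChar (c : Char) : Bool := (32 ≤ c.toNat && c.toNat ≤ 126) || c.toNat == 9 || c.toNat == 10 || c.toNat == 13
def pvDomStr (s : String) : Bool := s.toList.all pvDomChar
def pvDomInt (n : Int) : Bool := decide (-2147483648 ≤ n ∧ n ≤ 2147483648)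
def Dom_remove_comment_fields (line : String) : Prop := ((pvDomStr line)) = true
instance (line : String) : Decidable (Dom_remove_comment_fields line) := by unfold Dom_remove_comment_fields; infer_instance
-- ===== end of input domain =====

-- B replaces A's char-by-char toggle loop by splitting on ':' and joining the even-indexed segments (idiomatic; same cost).

-- ===== PORT A =====
def remove_comment_fields (line : String) : String :=
  let st := line.toList.foldl
    (fun (st : Bool × List Char) c =>
      if c = ':' then (!st.1, st.2)
      else if !st.1 then (st.1, st.2 ++ [c])
      else st)
    (false, [])
  String.ofList st.2  -- "".join over single chars = the string of those chars

-- ===== PORT B =====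
def remove_comment_fields_alt (line : String) : String :=
  let parts := PySem.Chars.splitOn line.toList [':']
  String.ofList (PySem.Chars.join []
    (((PySem.List.enumerate parts).filter (fun p => PySem.Int.mod p.1 2 == 0)).map (·.2)))

-- ===== PRECONDITION & SPEC =====
def Spec_remove_comment_fields (line : String) (out : String) : Prop := out = remove_comment_fields_alt line
instance (line : String) (out : String) : Decidable (Spec_remove_comment_fields line out) := by unfold Spec_remove_comment_fields; infer_instance

-- ===== CLAIM (what is proved, stated in full; the proofs are below) =====
def Claim_equal_remove_comment_fields : Prop := ∀ (line : String), Dom_remove_comment_fields line → Spec_remove_comment_fields line (remove_comment_fields line)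

-- ===== LEMMAS AND PROOFS =====
def mySplit : List Char → List (List Char)
  | [] => [[]]
  | c :: cs => if c = ':' then [] :: mySplit cs else
      match mySplit cs with
      | [] => [[c]]
      | h :: t => (c :: h) :: t
def consHead (x : List Char) : List (List Char) → List (List Char)
  | [] => [x]
  | h :: t => (x ++ h) :: t
lemma mySplit_ne_nil (cs : List Char) : mySplit cs ≠ [] := by
  cases cs with
  | nil => simp [mySplit]
  | cons c cs =>
    simp only [mySplit]; split
    · simp
    · cases h : mySplit cs <;> simp
lemma go_colon (fuel : Nat) :
    ∀ (l cur : List Char) (accs : List (List Char)), l.length ≤ fuel →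
    PySem.Chars.splitOn.go [':'] fuel l cur accs.reverse
      = accs ++ consHead cur.reverse (mySplit l) := by
  induction fuel with
  | zero =>
    intro l cur accs h
    have : l = [] := by cases l <;> simp_all
    subst this
    simp [PySem.Chars.splitOn.go, mySplit, consHead]
  | succ fuel ih =>
    intro l cur accs h
    cases l with
    | nil => simp [PySem.Chars.splitOn.go, mySplit, consHead]
    | cons c rest =>
      simp only [PySem.Chars.splitOn.go]
      by_cases hc : c = ':'
      · subst hc
        have hpre : [':'].isPrefixOf (':' :: rest) = true := by simp [List.isPrefixOf]
        rw [if_pos hpre]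
        have := ih rest [] (accs ++ [cur.reverse]) (by simpa using Nat.le_of_succ_le_succ h)
        simp only [List.reverse_append, List.reverse_cons, List.reverse_nil, List.nil_append,
          List.singleton_append, List.length_cons, List.length_nil, List.drop_succ_cons, List.drop_zero] at this ⊢
        rw [this]
        cases hms : mySplit rest with
        | nil => exact absurd hms (mySplit_ne_nil rest)
        | cons a t => simp [mySplit, consHead, hms]
      · have hpre : [':'].isPrefixOf (c :: rest) = false := by
          simp [List.isPrefixOf]; exact fun hh => absurd hh.symm hc
        rw [if_neg (by simp [hpre])]
        have := ih rest (c :: cur) accs (by simpa using Nat.le_of_succ_le_succ h)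
        rw [this]
        cases hms : mySplit rest with
        | nil => exact absurd hms (mySplit_ne_nil rest)
        | cons a t => simp [mySplit, consHead, hms, hc]

lemma consHead_nil (ps : List (List Char)) (h : ps ≠ []) : consHead [] ps = ps := by
  cases ps with
  | nil => exact absurd rfl h
  | cons a t => simp [consHead]

lemma splitOn_eq_mySplit (cs : List Char) :
    PySem.Chars.splitOn cs [':'] = mySplit cs := by
  have h := go_colon (cs.length + 1) cs [] [] (by omega)
  simpa [PySem.Chars.splitOn, consHead_nil _ (mySplit_ne_nil cs)] using h

lemma join_nil_flatten (ps : List (List Char)) : PySem.Chars.join [] ps = ps.flatten := by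
  induction ps with
  | nil => simp [PySem.Chars.join, List.intercalate]
  | cons p ps ih =>
    cases ps with
    | nil => simp [PySem.Chars.join, List.intercalate]
    | cons q t =>
      simp only [PySem.Chars.join, List.intercalate, List.intersperse] at ih ⊢
      simp_all [List.flatten]

lemma mod_succ_two (s : Int) (h : PySem.Int.mod s 2 = 0) : PySem.Int.mod (s+1) 2 = 1 := by
  have h2 := PySem.Int.floordiv_mul_add_mod s 2
  have h3 := PySem.Int.floordiv_mul_add_mod (s+1) 2
  rcases PySem.Int.mod_two_eq (s+1) with h1 | h1
  · omega
  · exact h1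

lemma mod_succ_two' (s : Int) (h : PySem.Int.mod s 2 = 1) : PySem.Int.mod (s+1) 2 = 0 := by
  have h2 := PySem.Int.floordiv_mul_add_mod s 2
  have h3 := PySem.Int.floordiv_mul_add_mod (s+1) 2
  rcases PySem.Int.mod_two_eq (s+1) with h1 | h1
  · exact h1
  · omega

def pick : Bool → List (List Char) → List Char
  | _, [] => []
  | b, p :: ps => (if b then [] else p) ++ pick (!b) ps

lemma sel_enumerate (ps : List (List Char)) :
    ∀ (s : Int),
      PySem.Chars.join []
        (((PySem.List.enumerate ps s).filter (fun p => PySem.Int.mod p.1 2 == 0)).map (·.2))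
        = pick (PySem.Int.mod s 2 != 0) ps := by
  induction ps with
  | nil => intro s; simp [PySem.List.enumerate_nil, PySem.Chars.join, List.intercalate, pick]
  | cons p ps ih =>
    intro s
    rw [PySem.List.enumerate_cons]
    rcases PySem.Int.mod_two_eq s with h | h
    · have ih' := ih (s+1)
      rw [join_nil_flatten] at ih' ⊢
      rw [mod_succ_two s h] at ih'
      simp only [List.filter_cons, h, show ((0:Int) == 0) = true from rfl, if_true,
        List.map_cons, List.flatten_cons]
      rw [ih']
      simp [pick]
    · have ih' := ih (s+1)
      rw [join_nil_flatten] at ih' ⊢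
      rw [mod_succ_two' s h] at ih'
      simp only [List.filter_cons, h, show ((1:Int) == 0) = false from rfl, Bool.false_eq_true, if_false]
      rw [ih']
      simp [pick]

lemma loop_spec (cs : List Char) :
    ∀ (st : Bool × List Char),
      (cs.foldl (fun (st : Bool × List Char) c =>
        if c = ':' then (!st.1, st.2)
        else if !st.1 then (st.1, st.2 ++ [c])
        else st) st).2 = st.2 ++ pick st.1 (mySplit cs) := by
  induction cs with
  | nil => intro st; simp [mySplit, pick]
  | cons c cs ih =>
    intro st
    simp only [List.foldl_cons]
    by_cases hc : c = ':'
    · subst hc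
      rw [if_pos rfl, ih]
      cases hb : st.1 <;> simp [mySplit, pick]
    · rw [if_neg hc]
      cases hb : st.1 with
      | false =>
        simp only [Bool.not_false, if_true]
        rw [ih]
        cases hms : mySplit cs with
        | nil => exact absurd hms (mySplit_ne_nil cs)
        | cons a t => simp [mySplit, pick, hms, hc]
      | true =>
        simp only [Bool.not_true, Bool.false_eq_true, if_false]
        rw [ih, hb]
        cases hms : mySplit cs with
        | nil => exact absurd hms (mySplit_ne_nil cs)
        | cons a t => simp [mySplit, pick, hms, hc]

-- ===== VERDICT (by name: the statement is the Claim_ definition above) =====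
theorem remove_comment_fields_spec : Claim_equal_remove_comment_fields := by
  intro line _
  show remove_comment_fields line = remove_comment_fields_alt line
  simp only [remove_comment_fields, remove_comment_fields_alt]
  rw [loop_spec, splitOn_eq_mySplit, sel_enumerate]
  norm_num
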